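-- pv_equiv track=rewrite | github.com/CorpsB/Epitech | TEK1/MAT/B-MAT-100-STG-1-1-103cipher-noe.carabin/calculate.py | get_msg_matrix
-- ===== SOURCE A (Python) =====
-- def get_msg_matrix(msg, n):
--     m = []
--     c = 0
--     i = 0
--
--     for carac in msg:
--         if (c == n):
--             c = 0
--             i += 1
--         if (c == 0):
--             m.append([])
--         m[i].append(ord(carac))
--         c += 1
--     for i in range(len(m)):
--         while (len(m[i]) < n):
--             m[i].append(0)
--     return m
-- ===== SOURCE B (Python) =====
-- def get_msg_matrix(msg, n):
--     codes = [ord(c) for c in msg]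
--     rows = []
--     for i in range(0, len(codes), n):
--         row = codes[i:i + n]
--         rows.append(row + [0] * (n - len(row)))
--     return rows
-- ===== Notes on version B (the rewrite author's own statement) =====
-- stated objective: simpler
-- what changed: B first maps the whole message to char codes, then slices that list into n-sized rows with a stepped range and pads each row arithmetically, instead of A's single interleaved pass that drives row creation with a counter and a mutable row index and pads with a per-cell while loop.
-- outside the precondition, e.g. on get_msg_matrix('', 0): A returns [], B raises ValueError; on get_msg_matrix('ab', -1): A returns [[97, 98]], B returns []
import Mathlib
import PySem

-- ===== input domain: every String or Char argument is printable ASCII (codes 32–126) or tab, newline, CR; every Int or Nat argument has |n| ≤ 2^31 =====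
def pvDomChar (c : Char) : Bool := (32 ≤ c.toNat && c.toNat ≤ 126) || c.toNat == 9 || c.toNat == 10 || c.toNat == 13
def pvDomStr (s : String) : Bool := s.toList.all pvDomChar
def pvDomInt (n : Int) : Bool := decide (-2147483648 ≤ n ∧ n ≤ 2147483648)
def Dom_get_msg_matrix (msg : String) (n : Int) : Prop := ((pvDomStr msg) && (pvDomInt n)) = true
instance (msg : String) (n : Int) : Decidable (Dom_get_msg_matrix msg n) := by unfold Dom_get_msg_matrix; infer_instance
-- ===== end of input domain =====

-- B separates code-mapping from row-building (slice rows of a precomputed code list, arithmetic padding)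
-- instead of A's counter-driven single pass with a per-cell padding while-loop; objective: simpler.

-- ===== PORT A =====
-- loop body of A's first 'for carac in msg' loop (state (m, c, i))
def stepA (n : Int) (st : List (List Int) × Int × Int) (carac : Char) : List (List Int) × Int × Int :=
  let m := st.1
  let ci := if st.2.1 == n then ((0 : Int), st.2.2 + 1) else (st.2.1, st.2.2)
  let c := ci.1
  let i := ci.2
  let m := if c == 0 then m ++ [([] : List Int)] else m
  let m := m.set i.toNat ((m.getD i.toNat []) ++ [(carac.toNat : Int)])
  (m, c + 1, i)

-- A's 'while (len(m[i]) < n): m[i].append(0)' padding loop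
def padA (n : Int) (row : List Int) : List Int :=
  if (row.length : Int) < n then padA n (row ++ [0]) else row
termination_by (n - row.length).toNat
decreasing_by simp; omega

def get_msg_matrix (msg : String) (n : Int) : List (List Int) :=
  let st := msg.toList.foldl (stepA n) ([], 0, 0)
  -- second loop: each row m[i] is padded in place
  st.1.map (padA n)

-- ===== PORT B =====
def get_msg_matrix_alt (msg : String) (n : Int) : List (List Int) :=
  let codes := msg.toList.map (fun c => (c.toNat : Int))
  (PySem.List.pyRange 0 codes.length n).map (fun i =>
    let row := PySem.List.slice codes (some i) (some (i + n))
    row ++ List.replicate (n - row.length).toNat 0)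

-- ===== PRECONDITION & SPEC =====
-- Pre_ excludes non-positive column counts n on a nonempty msg (outside the cipher's natural
-- domain: A raises IndexError for n = 0 and returns a single unpadded all-codes row for n < 0,
-- where B's row-slicing naturally yields []), and ("", 0), where A returns [] but B's range
-- step of 0 raises ValueError.
def Pre_get_msg_matrix (msg : String) (n : Int) : Prop := 1 ≤ n ∨ (msg = "" ∧ n ≠ 0)
instance (msg : String) (n : Int) : Decidable (Pre_get_msg_matrix msg n) := by
  unfold Pre_get_msg_matrix; infer_instance

def pvWitness_get_msg_matrix : String × Int := ("hello", 3)

def Spec_get_msg_matrix (msg : String) (n : Int) (out : List (List Int)) : Prop := out = get_msg_matrix_alt msg n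
instance (msg : String) (n : Int) (out : List (List Int)) : Decidable (Spec_get_msg_matrix msg n out) := by unfold Spec_get_msg_matrix; infer_instance

-- ===== CLAIM (what is proved, stated in full; the proofs are below) =====
def Claim_equal_get_msg_matrix : Prop := ∀ (msg : String) (n : Int), Dom_get_msg_matrix msg n → Pre_get_msg_matrix msg n → Spec_get_msg_matrix msg n (get_msg_matrix msg n)

-- ===== LEMMAS AND PROOFS =====

-- common reference shape: chunk a code list into rows of n codes (last row possibly short)
def chunkRows (n : Nat) : List Int → List (List Int)
  | [] => []
  | a :: l => ((a :: l).take n) :: chunkRows n (l.drop (n - 1))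
termination_by l => l.length
decreasing_by simp

theorem chunkRows_cons (n : Nat) (hn : 1 ≤ n) (xs : List Int) (hxs : xs ≠ []) :
    chunkRows n xs = xs.take n :: chunkRows n (xs.drop n) := by
  match xs, hxs, n, hn with
  | a :: l, _, (m+1), _ =>
    rw [chunkRows]
    simp

-- the result of A's first loop, in structured form: fill the current row 'cur' up to n,
-- then keep chunking
def fillA (n : Nat) (cur : List Int) : List Char → List (List Int)
  | [] => [cur]
  | x :: xs => if cur.length = n then cur :: fillA n [(x.toNat : Int)] xs
               else fillA n (cur ++ [(x.toNat : Int)]) xs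

theorem fillA_ne_nil (n : Nat) (cur : List Int) (xs : List Char) : fillA n cur xs ≠ [] := by
  induction xs generalizing cur with
  | nil => simp [fillA]
  | cons x xs ih => simp only [fillA]; split <;> simp [ih]

theorem fillA_eq_chunkRows (n : Nat) (xs : List Char) (cur : List Int)
    (hc : cur ≠ []) (hlen : cur.length ≤ n) :
    fillA n cur xs = chunkRows n (cur ++ xs.map (fun c => (c.toNat : Int))) := by
  induction xs generalizing cur with
  | nil =>
    match cur, hc, n, hlen with
    | a :: l, _, (m+1), hlen =>
      have h1 : l.take m = l := List.take_of_length_le (by simpa using hlen)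
      have h2 : l.drop m = [] := List.drop_eq_nil_of_le (by simpa using hlen)
      simp [fillA, chunkRows, h1, h2]
  | cons x xs ih =>
    have hn1 : 1 ≤ n := le_trans (by simpa [Nat.one_le_iff_ne_zero] using hc) hlen
    simp only [fillA]
    by_cases h : cur.length = n
    · simp only [if_pos h]
      rw [ih [(x.toNat : Int)] (by simp) (by simpa using hn1)]
      have ht : (cur ++ (x :: xs).map (fun c => (c.toNat : Int))).take n = cur := by
        rw [List.take_append_of_le_length h.ge]
        exact List.take_of_length_le h.le
      have hd : (cur ++ (x :: xs).map (fun c => (c.toNat : Int))).drop n = (x :: xs).map (fun c => (c.toNat : Int)) := by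
        rw [List.drop_append_of_le_length h.ge, List.drop_eq_nil_of_le h.le]
        simp
      rw [chunkRows_cons n hn1 (cur ++ (x :: xs).map (fun c => (c.toNat : Int))) (by simp), ht, hd]
      simp
    · simp only [if_neg h]
      rw [ih (cur ++ [(x.toNat : Int)]) (by simp) (by simp; omega)]
      simp

-- A's first loop computes fillA: invariant over the fold
theorem getLastD_irrel (l : List (List Int)) (d : List Int) (h : l ≠ []) :
    l.getLastD d = l.getLastD [] := by
  rw [List.getLastD_eq_getLast?, List.getLastD_eq_getLast?]
  match h2 : l.getLast? with
  | some a => simp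
  | none => exact absurd (List.getLast?_eq_none_iff.mp h2) h

theorem foldA_eq (n : Int) (hn : 1 ≤ n) (xs : List Char) :
    ∀ (done : List (List Int)) (cur : List Int), cur ≠ [] → (cur.length : Int) ≤ n →
    xs.foldl (stepA n) (done ++ [cur], (cur.length : Int), (done.length : Int))
      = (done ++ fillA n.toNat cur xs,
         (((fillA n.toNat cur xs).getLastD []).length : Int),
         ((done.length + (fillA n.toNat cur xs).length - 1 : Nat) : Int)) := by
  induction xs with
  | nil =>
    intro done cur hc hlen
    simp [fillA]
  | cons x xs ih =>
    intro done cur hc hlen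
    rw [List.foldl_cons]
    by_cases h : (cur.length : Int) = n
    · have hstep : stepA n (done ++ [cur], (cur.length : Int), (done.length : Int)) x
          = ((done ++ [cur]) ++ [[(x.toNat : Int)]], (1 : Int), ((done ++ [cur]).length : Int)) := by
        simp only [stepA]
        rw [if_pos (show (((cur.length : Int)) == n) = true by simp [h])]
        rw [if_pos (show (((0 : Int)) == 0) = true by simp)]
        have hgd : ((done ++ [cur]) ++ [([] : List Int)]).getD (done.length + 1) [] = [] := by
          rw [List.getD_eq_getElem?_getD]
          rw [show done ++ [cur] ++ [([] : List Int)] = done ++ [cur, []] by simp]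
          rw [List.getElem?_append_right (by simp)]
          simp
        have hst : ((done ++ [cur]) ++ [([] : List Int)]).set (done.length + 1) [(x.toNat : Int)]
            = (done ++ [cur]) ++ [[(x.toNat : Int)]] := by
          rw [List.set_append_right _ _ (by simp)]
          simp
        rw [show ((done.length : Int) + 1).toNat = done.length + 1 by omega, hgd]
        simp only [List.nil_append]
        rw [hst]
        simp
      rw [hstep]
      rw [show ((done ++ [cur]).length : Int) = (((done ++ [cur]).length : Nat) : Int) from rfl,
          show (1 : Int) = (([(x.toNat : Int)] : List Int).length : Int) by simp]
      rw [ih (done ++ [cur]) [(x.toNat : Int)] (by simp) (by simp; omega)]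
      have hfill : fillA n.toNat cur (x :: xs) = cur :: fillA n.toNat [(x.toNat : Int)] xs := by
        rw [fillA, if_pos (by omega)]
      rw [hfill]
      simp only [Prod.mk.injEq]
      refine ⟨by simp, ?_, ?_⟩
      · rw [List.getLastD_cons, getLastD_irrel _ cur (fillA_ne_nil _ _ _)]
      · simp only [List.length_append, List.length_cons]
        congr 1
        simp only [List.length_nil]
        omega
    · have hstep : stepA n (done ++ [cur], (cur.length : Int), (done.length : Int)) x
          = (done ++ [cur ++ [(x.toNat : Int)]], (cur.length : Int) + 1, (done.length : Int)) := by
        have hgd : (done ++ [cur]).getD done.length [] = cur := by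
          rw [List.getD_eq_getElem?_getD, List.getElem?_append_right (le_refl _)]
          simp
        have hst : (done ++ [cur]).set done.length (cur ++ [(x.toNat : Int)])
            = done ++ [cur ++ [(x.toNat : Int)]] := by
          rw [List.set_append_right _ _ (le_refl _)]
          simp
        simp only [stepA]
        rw [if_neg (show ¬ (((cur.length : Int)) == n) = true by simp [h])]
        rw [if_neg (show ¬ (((cur.length : Int)) == 0) = true by
          simp only [beq_iff_eq, Int.natCast_eq_zero, List.length_eq_zero_iff]; exact hc)]
        rw [show ((done.length : Int)).toNat = done.length by omega, hgd, hst]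
      rw [hstep]
      rw [show ((cur.length : Int) + 1) = (((cur ++ [(x.toNat : Int)]).length : Nat) : Int) by simp]
      rw [ih done (cur ++ [(x.toNat : Int)]) (by simp) (by simp; omega)]
      have hfill : fillA n.toNat cur (x :: xs) = fillA n.toNat (cur ++ [(x.toNat : Int)]) xs := by
        rw [fillA, if_neg (by omega)]
      rw [hfill]

-- A's padding while-loop is arithmetic padding
theorem padA_eq (n : Int) (row : List Int) :
    padA n row = row ++ List.replicate (n - row.length).toNat 0 := by
  by_cases h : (row.length : Int) < n
  · rw [padA, if_pos h, padA_eq n (row ++ [0])]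
    simp only [List.append_assoc, List.length_append, List.length_singleton]
    congr 1
    rw [show (n - (row.length + 1 : Nat)).toNat = (n - row.length).toNat - 1 by push_cast; omega]
    rw [show (n - (row.length : Int)).toNat = ((n - row.length).toNat - 1) + 1 by omega]
    simp [List.replicate_succ]
  · rw [padA, if_neg h]
    rw [show (n - (row.length : Int)).toNat = 0 by omega]
    simp
termination_by (n - row.length).toNat
decreasing_by simp; omega

-- B's stepped range of row starts produces exactly the chunks
theorem pyRange_pos_cons (a b n : Int) (hn : 1 ≤ n) (h : a < b) :
    PySem.List.pyRange a b n = a :: PySem.List.pyRange (a + n) b n := by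
  rw [PySem.List.pyRange_of_pos a b (by omega), PySem.List.pyRange_of_pos (a + n) b (by omega)]
  by_cases h2 : a + n < b
  · rw [if_pos h, if_pos h2]
    have e1 : (b - a + n - 1) / n = (b - (a + n) + n - 1) / n + 1 := by
      rw [show b - a + n - 1 = (b - (a + n) + n - 1) + 1 * n by ring]
      rw [Int.add_mul_ediv_right _ _ (by omega)]
    have e2 : 0 ≤ (b - (a + n) + n - 1) / n := by
      apply Int.ediv_nonneg <;> omega
    rw [e1, show ((b - (a + n) + n - 1) / n + 1).toNat = ((b - (a + n) + n - 1) / n).toNat + 1 by omega]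
    rw [List.range_succ_eq_map]
    simp only [List.map_cons, List.map_map]
    congr 1
    · simp
    · apply List.map_congr_left
      intro k _
      simp only [Function.comp]
      push_cast
      ring
  · rw [if_pos h, if_neg h2]
    have e0 : 0 ≤ b - a + n - 1 - n ∧ b - a + n - 1 - n < n := by omega
    have e1 : (b - a + n - 1) / n = 1 := by
      rw [show b - a + n - 1 = (b - a + n - 1 - n) + 1 * n by ring]
      rw [Int.add_mul_ediv_right _ _ (by omega)]
      rw [Int.ediv_eq_zero_of_lt e0.1 e0.2]
      norm_num
    rw [e1]
    norm_num [List.range_succ]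

theorem pyRange_pos_nil (a b n : Int) (hn : 1 ≤ n) (h : b ≤ a) :
    PySem.List.pyRange a b n = [] := by
  rw [PySem.List.pyRange_of_pos a b (by omega), if_neg (by omega)]
  simp

theorem B_rows_eq (n : Int) (hn : 1 ≤ n) (f : List Int → List Int) (xs : List Int) :
    ∀ (a : Nat), ((PySem.List.pyRange (a : Int) (xs.length : Int) n).map
        (fun i => f (PySem.List.slice xs (some i) (some (i + n)))))
      = (chunkRows n.toNat (xs.drop a)).map f := by
  intro a
  by_cases h : a < xs.length
  · rw [pyRange_pos_cons _ _ _ hn (by exact_mod_cast h)]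
    have hslice : PySem.List.slice xs (some (a : Int)) (some ((a : Int) + n))
        = (xs.drop a).take n.toNat := by
      rw [show (a : Int) + n = ((a : Int) + ((n.toNat : Nat) : Int)) by omega]
      exact PySem.List.slice_natCast_add xs a n.toNat
    have hrec := B_rows_eq n hn f xs (a + n.toNat)
    rw [List.map_cons, hslice]
    rw [show (a : Int) + n = ((a + n.toNat : Nat) : Int) by omega]
    rw [hrec]
    rw [chunkRows_cons n.toNat (by omega) (xs.drop a) (by
      simp only [ne_eq, List.drop_eq_nil_iff]
      omega)]
    rw [List.map_cons]
    congr 2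
    rw [← List.drop_drop]
  · rw [pyRange_pos_nil _ _ _ hn (by exact_mod_cast not_lt.mp h)]
    rw [List.drop_eq_nil_of_le (not_lt.mp h)]
    simp [chunkRows]
termination_by a => xs.length - a
decreasing_by omega

-- ===== VERDICT (by name: the statement is the Claim_ definition above) =====
theorem get_msg_matrix_spec : Claim_equal_get_msg_matrix := by
  intro msg n _ hpre
  unfold Spec_get_msg_matrix get_msg_matrix get_msg_matrix_alt
  dsimp only
  rcases hpre with hn | ⟨hmsg, hn0⟩
  · -- main case: 1 ≤ n
    cases h : msg.toList with
    | nil =>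
      simp only [List.foldl_nil, List.map_nil, List.length_nil, Nat.cast_zero]
      rw [pyRange_pos_nil 0 0 n hn (le_refl 0)]
      simp
    | cons x rest =>
      have hB := B_rows_eq n hn (fun row => row ++ List.replicate (n - row.length).toNat 0)
        ((x :: rest).map (fun c => (c.toNat : Int))) 0
      simp only [List.drop_zero, Nat.cast_zero] at hB
      have hA := foldA_eq n hn rest [] [(x.toNat : Int)] (by simp) (by simpa using hn)
      norm_num at hA
      have hstep0 : stepA n ([], 0, 0) x = ([[(x.toNat : Int)]], 1, 0) := by
        simp only [stepA]
        rw [if_neg (show ¬ (((0 : Int)) == n) = true by simp; omega)]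
        rw [if_pos (show (((0 : Int)) == 0) = true by simp)]
        simp
      rw [List.foldl_cons, hstep0, hA]
      dsimp only
      rw [fillA_eq_chunkRows n.toNat rest [(x.toNat : Int)] (by simp) (by simp; omega)]
      simp only [List.singleton_append, List.map_cons] at *
      rw [hB]
      apply List.map_congr_left
      intro row _
      exact padA_eq n row
  · -- empty message, n ≠ 0
    have h : msg.toList = [] := by simp [hmsg]
    rw [h]
    simp only [List.foldl_nil, List.map_nil, List.length_nil, Nat.cast_zero]
    rcases lt_or_gt_of_ne hn0 with hneg | hpos
    · rw [PySem.List.pyRange_of_neg 0 0 hneg, if_neg (by omega)]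
      simp
    · rw [pyRange_pos_nil 0 0 n (by omega) (le_refl 0)]
      simp
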